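-- pv_equiv track=rewrite | github.com/Presto-bit/aipodcast | backend/app.py | _expected_first_speaker_from_tail
-- ===== SOURCE A (Python) =====
-- def _expected_first_speaker_from_tail(prev_tail: str):
--     lines = [l.strip() for l in (prev_tail or "").splitlines() if l.strip()]
--     for ln in reversed(lines):
--         if ln.startswith("Speaker1:"):
--             return "Speaker2"
--         if ln.startswith("Speaker2:"):
--             return "Speaker1"
--     return None
-- ===== SOURCE B (Python) =====
-- def _expected_first_speaker_from_tail(prev_tail: str):
--     result = None
--     for raw in (prev_tail or "").splitlines():
--         ln = raw.strip()
--         if ln.startswith("Speaker1:"):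
--             result = "Speaker2"
--         elif ln.startswith("Speaker2:"):
--             result = "Speaker1"
--     return result
-- ===== Notes on version B (the rewrite author's own statement) =====
-- stated objective: simpler
-- what changed: Forward single-pass fold with an accumulator updated on speaker-prefixed lines, instead of building a stripped/filtered list and reverse-scanning it with early return.
import Mathlib
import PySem

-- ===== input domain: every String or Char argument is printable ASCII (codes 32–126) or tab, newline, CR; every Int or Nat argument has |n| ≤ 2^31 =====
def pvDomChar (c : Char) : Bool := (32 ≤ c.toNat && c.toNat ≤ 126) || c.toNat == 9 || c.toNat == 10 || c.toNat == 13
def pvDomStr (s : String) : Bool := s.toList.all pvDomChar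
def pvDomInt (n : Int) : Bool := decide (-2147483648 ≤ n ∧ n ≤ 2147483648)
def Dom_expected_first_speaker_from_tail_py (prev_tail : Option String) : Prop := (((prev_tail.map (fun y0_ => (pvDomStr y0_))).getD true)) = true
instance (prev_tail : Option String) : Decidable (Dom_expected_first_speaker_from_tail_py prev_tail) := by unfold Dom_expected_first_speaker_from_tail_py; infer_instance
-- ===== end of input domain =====

-- B replaces A's reverse scan with early return by a single forward fold that
-- overwrites an accumulator on speaker-prefixed lines (objective: simpler).

-- ===== PORT A =====
-- A's `for ln in reversed(lines): … return …` loop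
def pvScanA : List String → Option String
  | [] => none
  | ln :: rest =>
    if PySem.Str.startswith ln "Speaker1:" then some "Speaker2"
    else if PySem.Str.startswith ln "Speaker2:" then some "Speaker1"
    else pvScanA rest

def expected_first_speaker_from_tail_py (prev_tail : Option String) : Option String :=
  let s := prev_tail.getD ""
  let lines := ((PySem.Str.splitlines s).map PySem.Str.strip).filter (fun l => !(l == ""))
  pvScanA lines.reverse

-- ===== PORT B =====
-- Source B's loop body
def pvStepB (result : Option String) (raw : String) : Option String :=
  let ln := PySem.Str.strip raw
  if PySem.Str.startswith ln "Speaker1:" then some "Speaker2"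
  else if PySem.Str.startswith ln "Speaker2:" then some "Speaker1"
  else result

def expected_first_speaker_from_tail_py_alt (prev_tail : Option String) : Option String :=
  (PySem.Str.splitlines (prev_tail.getD "")).foldl pvStepB none

-- ===== PRECONDITION & SPEC =====
def Spec_expected_first_speaker_from_tail_py (prev_tail : Option String) (out : Option String) : Prop := out = expected_first_speaker_from_tail_py_alt prev_tail
instance (prev_tail : Option String) (out : Option String) : Decidable (Spec_expected_first_speaker_from_tail_py prev_tail out) := by unfold Spec_expected_first_speaker_from_tail_py; infer_instance

-- ===== CLAIM (what is proved, stated in full; the proofs are below) =====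
def Claim_equal_expected_first_speaker_from_tail_py : Prop := ∀ (prev_tail : Option String), Dom_expected_first_speaker_from_tail_py prev_tail → Spec_expected_first_speaker_from_tail_py prev_tail (expected_first_speaker_from_tail_py prev_tail)

-- ===== LEMMAS AND PROOFS =====

-- the per-line classification both loops branch on
def pvF (ln : String) : Option String :=
  if PySem.Str.startswith ln "Speaker1:" then some "Speaker2"
  else if PySem.Str.startswith ln "Speaker2:" then some "Speaker1"
  else none

-- last-match accumulator, abstractly: g of a list of (already stripped) lines
def pvG : List String → Option String
  | [] => none
  | x :: xs => (pvG xs).or (pvF x)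

theorem pvStepB_eq (acc : Option String) (raw : String) :
    pvStepB acc raw = (pvF (PySem.Str.strip raw)).or acc := by
  unfold pvStepB pvF
  dsimp only
  split_ifs <;> rfl

theorem pvScanA_cons (x : String) (xs : List String) :
    pvScanA (x :: xs) = (pvF x).or (pvScanA xs) := by
  show (if PySem.Str.startswith x "Speaker1:" then some "Speaker2"
        else if PySem.Str.startswith x "Speaker2:" then some "Speaker1"
        else pvScanA xs) = (pvF x).or (pvScanA xs)
  unfold pvF
  split_ifs <;> simp

theorem pvScanA_append (l1 l2 : List String) :
    pvScanA (l1 ++ l2) = (pvScanA l1).or (pvScanA l2) := by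
  induction l1 with
  | nil => simp [pvScanA]
  | cons x xs ih =>
    simp only [List.cons_append, pvScanA_cons, ih, Option.or_assoc]

theorem pvG_eq_scan_reverse (M : List String) : pvG M = pvScanA M.reverse := by
  induction M with
  | nil => rfl
  | cons x xs ih =>
    have h1 : pvScanA [x] = pvF x := by rw [pvScanA_cons]; simp [pvScanA]
    rw [List.reverse_cons, pvScanA_append, h1, ← ih]
    rfl

theorem pvG_filter (M : List String) :
    pvG (M.filter (fun l => !(l == ""))) = pvG M := by
  induction M with
  | nil => rfl
  | cons x xs ih =>
    simp only [List.filter_cons]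
    by_cases hx : x = ""
    · subst hx
      have h0 : pvF "" = none := by decide
      simp [pvG, h0, ih]
    · simp [hx, pvG, ih]

theorem pvFold_eq (L : List String) (acc : Option String) :
    L.foldl pvStepB acc = (pvG (L.map PySem.Str.strip)).or acc := by
  induction L generalizing acc with
  | nil => rfl
  | cons x xs ih =>
    simp only [List.foldl_cons, ih, pvStepB_eq, List.map_cons, pvG, Option.or_assoc]

-- ===== VERDICT (by name: the statement is the Claim_ definition above) =====
theorem expected_first_speaker_from_tail_py_spec : Claim_equal_expected_first_speaker_from_tail_py := by
  intro prev_tail _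
  unfold Spec_expected_first_speaker_from_tail_py
  unfold expected_first_speaker_from_tail_py expected_first_speaker_from_tail_py_alt
  rw [pvFold_eq, Option.or_none, ← pvG_filter, pvG_eq_scan_reverse]
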